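-- pv_equiv track=rewrite | github.com/kacper19037/Met.-In-.-Wiedzy | 3.py | minimalna
-- ===== SOURCE A (Python) =====
-- def minimalna(slownik):
--     klucze = list(slownik.keys())
--     klucz = klucze[0]
--     ile = 0
--     min = slownik[klucze[0]]
--     for i in klucze[1:]:
--         if min > slownik[i]:
--             min = slownik[i]
--             klucz = i
--             ile=0
--         elif min == slownik[i]:
--             ile+=1
--     if ile > 0:
--         return
--     return klucz
-- ===== SOURCE B (Python) =====
-- def minimalna(slownik):
--     values = list(slownik.values())
--     m = min(values)
--     if values.count(m) > 1:
--         return None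
--     for k, v in slownik.items():
--         if v == m:
--             return k
-- ===== Notes on version B (the rewrite author's own statement) =====
-- stated objective: simpler
-- what changed: Replaces A's single-pass loop that tracks a running minimum, its key and a tie counter with a direct decomposition: m = min(values), tie iff values.count(m) > 1 (then None), else return the first key whose value is m.
import Mathlib
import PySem

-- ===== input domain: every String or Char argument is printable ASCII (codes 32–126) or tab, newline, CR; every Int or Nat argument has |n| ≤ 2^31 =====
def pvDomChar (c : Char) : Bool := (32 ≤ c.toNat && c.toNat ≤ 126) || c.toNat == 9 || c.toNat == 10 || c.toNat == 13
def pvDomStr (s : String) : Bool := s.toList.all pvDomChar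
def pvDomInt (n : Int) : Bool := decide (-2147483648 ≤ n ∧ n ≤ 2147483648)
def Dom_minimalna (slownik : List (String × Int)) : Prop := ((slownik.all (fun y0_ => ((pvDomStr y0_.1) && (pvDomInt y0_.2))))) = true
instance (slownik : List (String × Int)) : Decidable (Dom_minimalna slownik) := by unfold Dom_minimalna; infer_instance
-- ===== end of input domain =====

-- B replaces A's single-pass min/key/tie-counter loop by the plain decomposition
-- min-of-values, count-of-min (tie -> none), then first key with that value (objective: simpler).

-- ===== PORT A =====
-- 'slownik[i]' — dict lookup, first match in the association list; never fails here
-- since every looked-up key is drawn from the dict itself.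
def pyLookup (slownik : List (String × Int)) (k : String) : Int :=
  ((slownik.find? (fun p => p.1 == k)).map Prod.snd).getD 0

def minimalna (slownik : List (String × Int)) : Option String :=
  let klucze := slownik.map Prod.fst
  match klucze with
  | [] => none  -- unreachable under Pre_: 'klucze[0]' raises IndexError on an empty dict
  | k0 :: rest =>
    -- state (klucz, ile, min), loop 'for i in klucze[1:]'
    let st := rest.foldl (fun (s : String × Int × Int) i =>
        if s.2.2 > pyLookup slownik i then (i, 0, pyLookup slownik i)
        else if s.2.2 = pyLookup slownik i then (s.1, s.2.1 + 1, s.2.2)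
        else s)
      (k0, (0 : Int), pyLookup slownik k0)
    if st.2.1 > 0 then none else some st.1

-- ===== PORT B =====
def minimalna_alt (slownik : List (String × Int)) : Option String :=
  match PySem.List.min? (slownik.map Prod.snd) (fun y => y) with
  | none => none  -- unreachable under Pre_: 'min' raises ValueError on an empty dict
  | some m =>
    if PySem.List.count (slownik.map Prod.snd) m > 1 then none
    else (slownik.find? (fun p => p.2 == m)).map Prod.fst

-- ===== PRECONDITION & SPEC =====
-- Pre_ excludes the empty dict, on which both A and B raise (IndexError / ValueError),
-- and duplicate keys, which cannot occur in a Python dict (an artefact of the list model only).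
def Pre_minimalna (slownik : List (String × Int)) : Prop :=
  slownik ≠ [] ∧ (slownik.map Prod.fst).Nodup
instance (slownik : List (String × Int)) : Decidable (Pre_minimalna slownik) := by
  unfold Pre_minimalna; infer_instance

def pvWitness_minimalna : (List (String × Int)) := [("a", 3), ("b", 1), ("c", 2)]

def Spec_minimalna (slownik : List (String × Int)) (out : Option String) : Prop := out = minimalna_alt slownik
instance (slownik : List (String × Int)) (out : Option String) : Decidable (Spec_minimalna slownik out) := by unfold Spec_minimalna; infer_instance

-- ===== CLAIM (what is proved, stated in full; the proofs are below) =====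
def Claim_equal_minimalna : Prop := ∀ (slownik : List (String × Int)), Dom_minimalna slownik → Pre_minimalna slownik → Spec_minimalna slownik (minimalna slownik)

-- ===== LEMMAS AND PROOFS =====

-- A's loop body with the dict lookup replaced by the pair's own value.
def gstep (s : String × Int × Int) (p : String × Int) : String × Int × Int :=
  if s.2.2 > p.2 then (p.1, 0, p.2)
  else if s.2.2 = p.2 then (s.1, s.2.1 + 1, s.2.2)
  else s

-- running minimum of the values
def fmin (l : List (String × Int)) (m : Int) : Int := l.foldl (fun a p => min a p.2) m

theorem fmin_le_init (l : List (String × Int)) (m : Int) : fmin l m ≤ m := by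
  induction l generalizing m with
  | nil => simp [fmin]
  | cons a t ih =>
    have := ih (min m a.2)
    simp only [fmin, List.foldl_cons] at *
    exact le_trans this (min_le_left _ _)

theorem fmin_le_mem (l : List (String × Int)) (m : Int) {v : Int}
    (hv : v ∈ l.map Prod.snd) : fmin l m ≤ v := by
  induction l generalizing m with
  | nil => simp at hv
  | cons a t ih =>
    simp only [List.map_cons, List.mem_cons] at hv
    simp only [fmin, List.foldl_cons]
    rcases hv with h | h
    · exact le_trans (fmin_le_init t _) (by simp [h])
    · exact ih _ h

theorem fmin_eq_init (l : List (String × Int)) (m : Int)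
    (h : ∀ p ∈ l, m ≤ p.2) : fmin l m = m := by
  induction l generalizing m with
  | nil => rfl
  | cons a t ih =>
    simp only [fmin, List.foldl_cons]
    have h1 : m ≤ a.2 := h a (by simp)
    rw [min_eq_left h1]
    exact ih m (fun p hp => h p (by simp [hp]))

theorem fmin_mem (l : List (String × Int)) (m : Int)
    (h : fmin l m ≠ m) : fmin l m ∈ l.map Prod.snd := by
  induction l generalizing m with
  | nil => simp [fmin] at h
  | cons a t ih =>
    rw [show fmin (a :: t) m = fmin t (min m a.2) from rfl] at h ⊢
    by_cases hc : fmin t (min m a.2) = min m a.2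
    · rw [hc] at h ⊢
      rcases min_cases m a.2 with ⟨he, _⟩ | ⟨he, _⟩
      · exact absurd he h
      · simp [he]
    · exact List.mem_cons_of_mem _ (ih _ hc)

theorem fmin_lt_init (l : List (String × Int)) (m : Int)
    (h : ¬ ∀ p ∈ l, m ≤ p.2) : fmin l m < m := by
  push_neg at h
  obtain ⟨p, hp, hlt⟩ := h
  exact lt_of_le_of_lt (fmin_le_mem l m (List.mem_map_of_mem hp)) hlt

-- characterisation of A's loop (on pairs): final state = (key of first occurrence of the
-- final minimum, occurrences of that minimum counted by the loop, the minimum itself)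
theorem loop_char (l : List (String × Int)) (k : String) (c m : Int) :
    l.foldl gstep (k, c, m) =
      if ∀ p ∈ l, m ≤ p.2
      then (k, c + ((l.map Prod.snd).count m : Int), m)
      else (((l.find? (fun p => p.2 == fmin l m)).map Prod.fst).getD k,
            ((l.map Prod.snd).count (fmin l m) : Int) - 1, fmin l m) := by
  induction l generalizing k c m with
  | nil => simp [fmin]
  | cons a t ih =>
    have hfm : fmin (a :: t) m = fmin t (min m a.2) := by simp [fmin]
    rcases lt_trichotomy a.2 m with hlt | heq | hgt
    · -- new minimum found
      have hstep : gstep (k, c, m) a = (a.1, 0, a.2) := by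
        simp [gstep, hlt]
      have hcond : ¬ ∀ p ∈ (a :: t), m ≤ p.2 := by
        intro h; exact absurd (h a (by simp)) (not_le.mpr hlt)
      rw [List.foldl_cons, hstep, ih, if_neg hcond]
      have hmin : min m a.2 = a.2 := min_eq_right (le_of_lt hlt)
      rw [hfm, hmin]
      by_cases h2 : ∀ p ∈ t, a.2 ≤ p.2
      · have hf : fmin t a.2 = a.2 := fmin_eq_init t a.2 h2
        rw [if_pos h2, hf]
        simp [List.count_cons]
      · have hf : fmin t a.2 < a.2 := fmin_lt_init t a.2 h2
        rw [if_neg h2]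
        have hne : (a.2 == fmin t a.2) = false := by
          simp [ne_of_gt hf]
        have hskip : (a :: t).find? (fun p => p.2 == fmin t a.2)
            = t.find? (fun p => p.2 == fmin t a.2) := by
          simp [List.find?_cons, hne]
        have hmem : fmin t a.2 ∈ t.map Prod.snd := fmin_mem t a.2 (ne_of_lt hf)
        obtain ⟨p, hp, hpv⟩ := List.mem_map.mp hmem
        obtain ⟨q, hq⟩ : ∃ q, t.find? (fun p => p.2 == fmin t a.2) = some q := by
          rcases ho : t.find? (fun p => p.2 == fmin t a.2) with _ | q
          · exfalso
            have h3 := List.find?_eq_none.mp ho p hp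
            rw [hpv] at h3
            simp at h3
          · exact ⟨q, ho⟩
        refine Prod.ext ?_ (Prod.ext ?_ rfl)
        · rw [hskip, hq]; simp
        · simp [List.count_cons, ne_of_gt hf]
    · -- equal to the current minimum: tie counter increments
      have hstep : gstep (k, c, m) a = (k, c + 1, m) := by
        simp [gstep, heq]
      have hcond : (∀ p ∈ (a :: t), m ≤ p.2) ↔ (∀ p ∈ t, m ≤ p.2) := by
        constructor
        · intro h p hp; exact h p (by simp [hp])
        · intro h p hp
          rcases List.mem_cons.mp hp with h1 | h1
          · simp [h1, heq.symm.le]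
          · exact h p h1
      have hmin : min m a.2 = m := by simp [heq]
      rw [List.foldl_cons, hstep, ih, hfm, hmin]
      by_cases h2 : ∀ p ∈ t, m ≤ p.2
      · rw [if_pos h2, if_pos (hcond.mpr h2)]
        simp only [List.map_cons, List.count_cons]
        refine Prod.ext rfl (Prod.ext ?_ rfl)
        simp [heq]
        push_cast
        ring
      · have hf : fmin t m < m := fmin_lt_init t m h2
        rw [if_neg h2, if_neg (fun h => h2 (hcond.mp h))]
        have hne : (a.2 == fmin t m) = false := by
          simp [heq, ne_of_gt hf]
        refine Prod.ext ?_ (Prod.ext ?_ rfl)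
        · simp [List.find?_cons, hne]
        · have hne' : a.2 ≠ fmin t m := by rw [heq]; exact ne_of_gt hf
          simp [List.count_cons, hne']
    · -- larger than the current minimum: state unchanged
      have hstep : gstep (k, c, m) a = (k, c, m) := by
        simp [gstep, not_lt.mpr (le_of_lt hgt), ne_of_lt hgt]
      have hcond : (∀ p ∈ (a :: t), m ≤ p.2) ↔ (∀ p ∈ t, m ≤ p.2) := by
        constructor
        · intro h p hp; exact h p (by simp [hp])
        · intro h p hp
          rcases List.mem_cons.mp hp with h1 | h1
          · simp [h1, le_of_lt hgt]
          · exact h p h1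
      have hmin : min m a.2 = m := min_eq_left (le_of_lt hgt)
      rw [List.foldl_cons, hstep, ih, hfm, hmin]
      by_cases h2 : ∀ p ∈ t, m ≤ p.2
      · rw [if_pos h2, if_pos (hcond.mpr h2)]
        simp [List.count_cons, ne_of_gt hgt]
      · have hf : fmin t m < m := fmin_lt_init t m h2
        rw [if_neg h2, if_neg (fun h => h2 (hcond.mp h))]
        have hne : (a.2 == fmin t m) = false := by
          simp [ne_of_gt (lt_trans hf hgt)]
        refine Prod.ext ?_ (Prod.ext ?_ rfl)
        · simp [List.find?_cons, hne]
        · simp [List.count_cons, ne_of_gt (lt_trans hf hgt)]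

-- with distinct keys the dict lookup of a key present in the list returns its value
theorem pyLookup_of_mem (slownik : List (String × Int))
    (hnd : (slownik.map Prod.fst).Nodup) {p : String × Int} (hp : p ∈ slownik) :
    pyLookup slownik p.1 = p.2 := by
  induction slownik with
  | nil => simp at hp
  | cons a t ih =>
    simp only [List.map_cons, List.nodup_cons] at hnd
    rcases List.mem_cons.mp hp with h | h
    · subst h
      simp [pyLookup]
    · have hne : (a.1 == p.1) = false := by
        simp only [beq_eq_false_iff_ne, ne_eq]
        intro hk
        exact hnd.1 (hk ▸ List.mem_map_of_mem h)
      simpa [pyLookup, List.find?_cons, hne] using ih hnd.2 h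

-- ===== VERDICT (by name: the statement is the Claim_ definition above) =====
theorem minimalna_spec : Claim_equal_minimalna := by
  intro slownik _hdom hpre
  obtain ⟨hne, hnd⟩ := hpre
  unfold Spec_minimalna
  obtain ⟨⟨k0, v0⟩, rest, rfl⟩ : ∃ a t, slownik = a :: t := by
    cases slownik with
    | nil => exact absurd rfl hne
    | cons a t => exact ⟨a, t, rfl⟩
  have hdict : ∀ p ∈ (k0, v0) :: rest, pyLookup ((k0, v0) :: rest) p.1 = p.2 :=
    fun p hp => pyLookup_of_mem _ hnd hp
  have h0 : pyLookup ((k0, v0) :: rest) k0 = v0 := hdict (k0, v0) (by simp)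
  -- rewrite A's fold over keys as a fold over the pairs themselves
  have hfold :
      (rest.map Prod.fst).foldl (fun (s : String × Int × Int) i =>
          if s.2.2 > pyLookup ((k0, v0) :: rest) i then (i, 0, pyLookup ((k0, v0) :: rest) i)
          else if s.2.2 = pyLookup ((k0, v0) :: rest) i then (s.1, s.2.1 + 1, s.2.2)
          else s) (k0, (0 : Int), pyLookup ((k0, v0) :: rest) k0)
        = rest.foldl gstep (k0, (0 : Int), v0) := by
    rw [List.foldl_map, h0]
    apply PySem.List.foldl_congr_mem
    intro acc p hp
    rw [hdict p (List.mem_cons_of_mem _ hp)]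
    rfl
  show minimalna ((k0, v0) :: rest) = _
  unfold minimalna
  simp only [List.map_cons, hfold]
  rw [loop_char]
  unfold minimalna_alt
  rw [List.map_cons, PySem.List.min?_id_cons]
  have hmv : (rest.map Prod.snd).foldl min v0 = fmin rest v0 := by
    rw [List.foldl_map]; rfl
  rw [hmv]
  by_cases hall : ∀ p ∈ rest, v0 ≤ p.2
  · -- the head value is the minimum
    rw [if_pos hall, fmin_eq_init rest v0 hall]
    have hfind : ((k0, v0) :: rest).find? (fun p => p.2 == v0) = some (k0, v0) := by
      simp [List.find?_cons]
    simp only [hfind, PySem.List.count, List.count_cons_self]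
    split_ifs with h1 h2 <;> first | rfl | (exfalso; omega)
  · -- the minimum is strictly below the head value
    rw [if_neg hall]
    have hf : fmin rest v0 < v0 := fmin_lt_init rest v0 hall
    have hnehd : (v0 == fmin rest v0) = false := by simp [ne_of_gt hf]
    have hmem : fmin rest v0 ∈ rest.map Prod.snd := fmin_mem rest v0 (ne_of_lt hf)
    obtain ⟨p, hp, hpv⟩ := List.mem_map.mp hmem
    obtain ⟨q, hq⟩ : ∃ q, rest.find? (fun p => p.2 == fmin rest v0) = some q := by
      rcases ho : rest.find? (fun p => p.2 == fmin rest v0) with _ | q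
      · exfalso
        have h3 := List.find?_eq_none.mp ho p hp
        rw [hpv] at h3
        simp at h3
      · exact ⟨q, ho⟩
    have hcnt : PySem.List.count (v0 :: rest.map Prod.snd) (fmin rest v0)
        = (rest.map Prod.snd).count (fmin rest v0) := by
      simp [PySem.List.count, List.count_cons, ne_of_gt hf]
    have hfind : ((k0, v0) :: rest).find? (fun p => p.2 == fmin rest v0) = some q := by
      rw [List.find?_cons_of_neg (by simp [hnehd])]
      exact hq
    simp only [List.map_cons, hcnt, hfind, hq]
    split_ifs with h1 h2 <;> first | rfl | (exfalso; omega)
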